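-- pv_equiv track=rewrite | github.com/mattire/IfcConvertColladaColorFix | utils.py | findRefs
-- ===== SOURCE A (Python) =====
-- def findRefs(brackets):
--     refs = []
--     ends = [i for i, x in enumerate(brackets) if x in [',',')']]
--     begings = [i for i, x in enumerate(brackets) if x in ['#']]
--     for b in begings:
--         end = [e for e in ends if e > b][0]
--         refs.append(brackets[b:end][1:])
--     return refs
-- ===== SOURCE B (Python) =====
-- def findRefs(brackets):
--     refs = []
--     pos = brackets.find('#')
--     while pos != -1:
--         end = pos + 1
--         while end < len(brackets) and brackets[end] not in ',)':
--             end += 1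
--         refs.append(brackets[pos + 1:end])
--         pos = brackets.find('#', pos + 1)
--     return refs
-- ===== Notes on version B (the rewrite author's own statement) =====
-- stated objective: faster
-- what changed: Replaced A's build-two-index-lists-then-rescan-the-ends-list-per-'#' approach with a single forward scan that copies the characters after each '#' up to the next ',' or ')'.
-- outside the precondition, e.g. on findRefs('#ab'): A raises IndexError, B returns ['ab']
import Mathlib
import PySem

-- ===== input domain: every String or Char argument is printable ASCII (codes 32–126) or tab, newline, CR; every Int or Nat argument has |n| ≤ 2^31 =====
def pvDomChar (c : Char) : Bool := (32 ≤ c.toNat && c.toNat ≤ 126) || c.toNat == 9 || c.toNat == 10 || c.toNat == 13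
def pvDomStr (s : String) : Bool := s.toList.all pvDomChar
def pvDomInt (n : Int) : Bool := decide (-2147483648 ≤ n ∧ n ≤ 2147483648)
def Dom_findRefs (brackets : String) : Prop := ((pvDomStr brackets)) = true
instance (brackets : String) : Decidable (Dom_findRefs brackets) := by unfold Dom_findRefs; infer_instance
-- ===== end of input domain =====

-- B replaces A's "build index lists, rescan the ends list per '#'" with one forward scan
-- that copies the characters after each '#' up to the next ','/')' (objective: faster, fewer passes).

-- ===== PORT A =====
-- string slices are ported on .toList (exact: code points); the list-index [0] of
-- '[e for e in ends if e > b][0]' is ported as head? — the none branch is Python's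
-- IndexError, excluded by Pre_findRefs.
def findRefs (brackets : String) : List String :=
  let l := brackets.toList
  let ends : List Int := ((PySem.List.enumerate l 0).filter (fun p => p.2 == ',' || p.2 == ')')).map Prod.fst
  let begings : List Int := ((PySem.List.enumerate l 0).filter (fun p => p.2 == '#')).map Prod.fst
  begings.foldl (fun refs b =>
    match (ends.filter (fun e => decide (b < e))).head? with
    | some e => refs ++ [String.mk (PySem.List.slice (PySem.List.slice l (some b) (some e)) (some 1) none)]
    | none => refs) []

-- ===== PORT B =====
-- Source B's inner while: copy characters until the next ',' or ')' (or the end of the string)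
def pvTakeRef : List Char → List Char
  | [] => []
  | c :: r => if c = ',' ∨ c = ')' then [] else c :: pvTakeRef r

-- Source B's outer while over successive positions of '#'
def pvGoB : List Char → List (List Char)
  | [] => []
  | c :: r => (if c = '#' then [pvTakeRef r] else []) ++ pvGoB r

def findRefs_alt (brackets : String) : List String := (pvGoB brackets.toList).map String.mk

-- ===== PRECONDITION & SPEC =====
-- Pre_ excludes exactly the inputs where some '#' has no later ',' or ')': there A's
-- '[e for e in ends if e > b][0]' raises IndexError.
def Pre_findRefs (brackets : String) : Prop :=
  ∀ i < brackets.toList.length, brackets.toList[i]? = some '#' →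
    ∃ j < brackets.toList.length, i < j ∧
      (brackets.toList[j]? = some ',' ∨ brackets.toList[j]? = some ')')
instance (brackets : String) : Decidable (Pre_findRefs brackets) := by
  unfold Pre_findRefs; infer_instance

def pvWitness_findRefs : String := "(#ab,#c)"

def Spec_findRefs (brackets : String) (out : List String) : Prop := out = findRefs_alt brackets
instance (brackets : String) (out : List String) : Decidable (Spec_findRefs brackets out) := by
  unfold Spec_findRefs; infer_instance

-- ===== CLAIM (what is proved, stated in full; the proofs are below) =====
def Claim_equal_findRefs : Prop := ∀ (brackets : String), Dom_findRefs brackets → Pre_findRefs brackets → Spec_findRefs brackets (findRefs brackets)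

-- ===== LEMMAS AND PROOFS =====

-- first index of a ',' or ')' (proof-side characterisation of both programs' "next end")
def pvFirstEnd : List Char → Option Nat
  | [] => none
  | c :: r => if c = ',' ∨ c = ')' then some 0 else (pvFirstEnd r).map (· + 1)

-- unbounded form of Pre_ used in the induction
def PreL (l : List Char) : Prop :=
  ∀ i : Nat, l[i]? = some '#' → ∃ j, i < j ∧ (l[j]? = some ',' ∨ l[j]? = some ')')

theorem preL_of_pre (s : String) (h : Pre_findRefs s) : PreL s.toList := by
  intro i hi
  have hlen : i < s.toList.length := by
    by_contra hb
    rw [List.getElem?_eq_none (by omega)] at hi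
    simp at hi
  obtain ⟨j, hj, hij, hend⟩ := h i hlen hi
  exact ⟨j, hij, hend⟩

theorem preL_cons {c : Char} {r : List Char} (h : PreL (c :: r)) : PreL r := by
  intro i hi
  obtain ⟨j, hij, hend⟩ := h (i + 1) (by simpa using hi)
  refine ⟨j - 1, by omega, ?_⟩
  have hj0 : j ≠ 0 := by omega
  obtain ⟨j', rfl⟩ := Nat.exists_eq_succ_of_ne_zero hj0
  simpa using hend

theorem firstEnd_of_exists {r : List Char}
    (h : ∃ j : Nat, r[j]? = some ',' ∨ r[j]? = some ')') :
    ∃ k, pvFirstEnd r = some k := by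
  induction r with
  | nil => obtain ⟨j, hj⟩ := h; simp at hj
  | cons c t ih =>
    by_cases hc : c = ',' ∨ c = ')'
    · exact ⟨0, by simp [pvFirstEnd, hc]⟩
    · obtain ⟨j, hj⟩ := h
      match j, hj with
      | 0, hj =>
        simp at hj
        rcases hj with h1 | h1 <;> exact absurd (by simp [h1]) hc
      | j + 1, hj =>
        obtain ⟨k, hk⟩ := ih ⟨j, by simpa using hj⟩
        exact ⟨k + 1, by simp [pvFirstEnd, hc, hk]⟩

theorem takeRef_eq_take {r : List Char} {k : Nat} (h : pvFirstEnd r = some k) :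
    pvTakeRef r = r.take k := by
  induction r generalizing k with
  | nil => simp [pvFirstEnd] at h
  | cons c t ih =>
    by_cases hc : c = ',' ∨ c = ')'
    · simp [pvFirstEnd, hc] at h
      simp [pvTakeRef, hc, ← h]
    · simp [pvFirstEnd, hc] at h
      obtain ⟨k', hk', rfl⟩ := h
      simp [pvTakeRef, hc, ih hk']

-- head of the filtered-enumerate "ends" list = first end, shifted by the start index
theorem headE (r : List Char) (s : Int) :
    ((((PySem.List.enumerate r s).filter (fun p => p.2 == ',' || p.2 == ')')).map Prod.fst)).head?
      = (pvFirstEnd r).map (fun k => s + (k : Int)) := by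
  induction r generalizing s with
  | nil => simp [PySem.List.enumerate_nil, pvFirstEnd]
  | cons c t ih =>
    rw [PySem.List.enumerate_cons]
    by_cases hc : c = ',' ∨ c = ')'
    · have hb : (c == ',' || c == ')') = true := by
        rcases hc with h | h <;> simp [h]
      simp [hb, pvFirstEnd, hc]
    · have hb : (c == ',' || c == ')') = false := by
        simp only [Bool.or_eq_false_iff, beq_eq_false_iff_ne]
        exact ⟨fun h => hc (Or.inl h), fun h => hc (Or.inr h)⟩
      rw [List.filter_cons_of_neg (by simp [hb])]
      rw [ih (s + 1)]
      cases h : pvFirstEnd t <;> simp [pvFirstEnd, hc, h] 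
      omega

-- every index in an enumerate-from-s list is ≥ s
theorem mem_E_ge (m : List Char) (s : Int) (f : Int × Char → Bool) {e : Int}
    (he : e ∈ ((PySem.List.enumerate m s).filter f).map Prod.fst) : s ≤ e := by
  obtain ⟨p, hp, rfl⟩ := List.mem_map.1 he
  have hp' := List.mem_of_mem_filter hp
  obtain ⟨k, hk, rfl⟩ := (PySem.List.mem_enumerate_iff m s p).1 hp'
  simp

-- every index in an enumerate-from-s list is < s + length
theorem mem_E_lt (m : List Char) (s : Int) (f : Int × Char → Bool) {e : Int}
    (he : e ∈ ((PySem.List.enumerate m s).filter f).map Prod.fst) : e < s + m.length := by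
  obtain ⟨p, hp, rfl⟩ := List.mem_map.1 he
  have hp' := List.mem_of_mem_filter hp
  obtain ⟨k, hk, rfl⟩ := (PySem.List.mem_enumerate_iff m s p).1 hp'
  simp
  omega

-- indices in the prefix part of the full "ends" list never pass the 'e > b' filter
theorem filter_E_append (pre m : List Char) (f : Int × Char → Bool) (b : Int)
    (hb : (pre.length : Int) ≤ b) :
    ((((PySem.List.enumerate (pre ++ m) 0).filter f).map Prod.fst).filter (fun e => decide (b < e)))
      = ((((PySem.List.enumerate m (pre.length : Int)).filter f).map Prod.fst).filter (fun e => decide (b < e))) := by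
  rw [PySem.List.enumerate_append, List.filter_append, List.map_append, List.filter_append]
  have h1 : ((((PySem.List.enumerate pre 0).filter f).map Prod.fst).filter (fun e => decide (b < e))) = [] := by
    rw [List.filter_eq_nil_iff]
    intro e he
    have := mem_E_lt pre 0 f he
    simp
    omega
  rw [h1, List.nil_append]
  norm_num

theorem mainLem : ∀ (m pre : List Char) (acc : List String), PreL m →
    ((((PySem.List.enumerate m (pre.length : Int)).filter (fun p => p.2 == '#')).map Prod.fst).foldl
      (fun refs b =>
        match (((((PySem.List.enumerate (pre ++ m) 0).filter (fun p => p.2 == ',' || p.2 == ')')).map Prod.fst)).filter (fun e => decide (b < e))).head? with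
        | some e => refs ++ [String.mk (PySem.List.slice (PySem.List.slice (pre ++ m) (some b) (some e)) (some 1) none)]
        | none => refs) acc)
      = acc ++ (pvGoB m).map String.mk := by
  intro m
  induction m with
  | nil => intro pre acc _; simp [PySem.List.enumerate_nil, pvGoB]
  | cons c r ih =>
    intro pre acc hpre
    rw [PySem.List.enumerate_cons]
    by_cases hc : c = '#'
    · subst hc
      rw [List.filter_cons_of_pos (by simp), List.map_cons, List.foldl_cons]
      -- compute the match scrutinee at b = pre.length
      obtain ⟨k, hk⟩ : ∃ k, pvFirstEnd r = some k := by
        apply firstEnd_of_exists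
        obtain ⟨j, hij, hend⟩ := hpre 0 (by simp)
        obtain ⟨j', rfl⟩ := Nat.exists_eq_succ_of_ne_zero (by omega : j ≠ 0)
        exact ⟨j', by simpa using hend⟩
      have hscrut :
          (((((PySem.List.enumerate (pre ++ '#' :: r) 0).filter (fun p => p.2 == ',' || p.2 == ')')).map Prod.fst)).filter
            (fun e => decide ((pre.length : Int) < e))).head?
            = some ((pre.length : Int) + 1 + (k : Int)) := by
        rw [filter_E_append pre ('#' :: r) _ _ (le_refl _)]
        rw [PySem.List.enumerate_cons, List.filter_cons_of_neg (by simp)]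
        have hall : ((((PySem.List.enumerate r ((pre.length : Int) + 1)).filter (fun p => p.2 == ',' || p.2 == ')')).map Prod.fst).filter (fun e => decide ((pre.length : Int) < e)))
            = (((PySem.List.enumerate r ((pre.length : Int) + 1)).filter (fun p => p.2 == ',' || p.2 == ')')).map Prod.fst) := by
          rw [List.filter_eq_self]
          intro e he
          have := mem_E_ge r ((pre.length : Int) + 1) _ he
          simp
          omega
        rw [hall, headE, hk]
        simp
      rw [hscrut]
      dsimp only
      have hslice : PySem.List.slice (PySem.List.slice (pre ++ '#' :: r) (some (pre.length : Int)) (some ((pre.length : Int) + 1 + (k : Int)))) (some 1) none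
          = pvTakeRef r := by
        have hcast : ((pre.length : Int) + 1 + (k : Int)) = ((pre.length + 1 + k : Nat) : Int) := by push_cast; ring
        rw [hcast, PySem.List.slice_natCast, List.drop_left]
        have h2 : pre.length + 1 + k - pre.length = k + 1 := by omega
        rw [h2, List.take_succ_cons, PySem.List.slice_from_one, List.tail_cons, takeRef_eq_take hk]
      rw [hslice]
      have hrw : pre ++ '#' :: r = (pre ++ ['#']) ++ r := by rw [List.append_cons]
      have hlen : (pre.length : Int) + 1 = (((pre ++ ['#']).length : Nat) : Int) := by simp
      rw [hrw, hlen, ih (pre ++ ['#']) (acc ++ [String.mk (pvTakeRef r)]) (preL_cons hpre)]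
      simp [pvGoB]
    · rw [List.filter_cons_of_neg (by simpa using hc)]
      have hrw : pre ++ c :: r = (pre ++ [c]) ++ r := by rw [List.append_cons]
      have hlen : (pre.length : Int) + 1 = (((pre ++ [c]).length : Nat) : Int) := by simp
      rw [hrw, hlen, ih (pre ++ [c]) acc (preL_cons hpre)]
      simp [pvGoB, hc]

-- ===== VERDICT (by name: the statement is the Claim_ definition above) =====
theorem findRefs_spec : Claim_equal_findRefs := by
  intro s _ hp
  unfold Spec_findRefs findRefs findRefs_alt
  have h := mainLem s.toList [] [] (preL_of_pre s hp)
  simpa using h
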